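-- pv_equiv track=rewrite | github.com/randysworldwide/Tracking_Automation | scripts/suredone_tracking_update.py | channel_of
-- ===== SOURCE A (Python) =====
-- def channel_of(order_ref):
--     """Return a short channel label for reporting."""
--     for prefix in ("shopifyYUK","shopifyZUM","shopifyRWW","shopifyUSA","shopifyB2B","shopifyDYN"):
--         if order_ref.startswith(prefix):
--             return prefix.replace("shopify","")
--     if order_ref.startswith("amazon"):  return "AMAZON"
--     if order_ref.startswith("walmart"): return "WALMART"
--     if order_ref.startswith("ebay"):    return "EBAY"
--     if order_ref.startswith("shopify"): return "shopify(skip)"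
--     return "OTHER(skip)"
-- ===== SOURCE B (Python) =====
-- def channel_of(order_ref):
--     """Return a short channel label for reporting."""
--     # Longest-prefix-match over a dispatch table: order of entries is irrelevant,
--     # the longest matching key wins (so "shopifyYUK" beats "shopify").
--     table = {
--         "amazon": "AMAZON", "ebay": "EBAY", "shopify": "shopify(skip)",
--         "shopifyB2B": "B2B", "shopifyDYN": "DYN", "shopifyRWW": "RWW",
--         "shopifyUSA": "USA", "shopifyYUK": "YUK", "shopifyZUM": "ZUM",
--         "walmart": "WALMART",
--     }
--     best, best_len = "OTHER(skip)", -1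
--     for p, label in table.items():
--         if len(p) > best_len and order_ref.startswith(p):
--             best, best_len = label, len(p)
--     return best
-- ===== Notes on version B (the rewrite author's own statement) =====
-- stated objective: alternative
-- what changed: Replaced A's ordered early-return branch chain over hard-coded prefixes by a data-driven longest-prefix-match: a single accumulator fold over an order-independent dispatch table keeps the label of the longest key matched so far, so the specific/general shopify distinction falls out of key length instead of branch order.
import Mathlib
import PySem

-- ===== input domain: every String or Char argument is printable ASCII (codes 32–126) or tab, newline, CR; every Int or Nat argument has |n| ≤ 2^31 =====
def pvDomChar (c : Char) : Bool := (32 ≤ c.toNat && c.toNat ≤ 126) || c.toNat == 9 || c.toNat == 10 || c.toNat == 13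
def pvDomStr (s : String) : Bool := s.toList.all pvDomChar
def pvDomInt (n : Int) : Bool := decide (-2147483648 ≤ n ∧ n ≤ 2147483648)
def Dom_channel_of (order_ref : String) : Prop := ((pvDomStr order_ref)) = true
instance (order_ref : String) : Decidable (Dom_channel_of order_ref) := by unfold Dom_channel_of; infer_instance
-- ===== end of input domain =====

-- B replaces A's ordered early-return branch chain by a longest-prefix-match fold
-- over an order-independent dispatch table; objective: alternative algorithm.

-- ===== PORT A =====
-- the for-loop over the six full prefixes, with its early return as an Option
def channel_of_loop (prefixes : List String) (order_ref : String) : Option String :=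
  match prefixes with
  | [] => none
  | p :: rest =>
    if PySem.Str.startswith order_ref p then some (PySem.Str.replace p "shopify" "")
    else channel_of_loop rest order_ref

def channel_of (order_ref : String) : String :=
  match channel_of_loop ["shopifyYUK", "shopifyZUM", "shopifyRWW", "shopifyUSA", "shopifyB2B", "shopifyDYN"] order_ref with
  | some r => r
  | none =>
    if PySem.Str.startswith order_ref "amazon" then "AMAZON"
    else if PySem.Str.startswith order_ref "walmart" then "WALMART"
    else if PySem.Str.startswith order_ref "ebay" then "EBAY"
    else if PySem.Str.startswith order_ref "shopify" then "shopify(skip)"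
    else "OTHER(skip)"

-- ===== PORT B =====
-- the dispatch table (Python dict in insertion order; keys distinct)
def channel_of_table : List (String × String) :=
  [("amazon", "AMAZON"), ("ebay", "EBAY"), ("shopify", "shopify(skip)"),
   ("shopifyB2B", "B2B"), ("shopifyDYN", "DYN"), ("shopifyRWW", "RWW"),
   ("shopifyUSA", "USA"), ("shopifyYUK", "YUK"), ("shopifyZUM", "ZUM"),
   ("walmart", "WALMART")]

-- the accumulator loop: keep (best, best_len), longest matching key wins
def channel_of_alt (order_ref : String) : String :=
  (channel_of_table.foldl
    (fun acc pl =>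
      if decide (acc.2 < (pl.1.toList.length : Int)) && PySem.Str.startswith order_ref pl.1
      then (pl.2, (pl.1.toList.length : Int)) else acc)
    ("OTHER(skip)", (-1 : Int))).1

-- ===== PRECONDITION & SPEC =====
def Spec_channel_of (order_ref : String) (out : String) : Prop := out = channel_of_alt order_ref
instance (order_ref : String) (out : String) : Decidable (Spec_channel_of order_ref out) := by unfold Spec_channel_of; infer_instance

-- ===== CLAIM =====
def Claim_equal_channel_of : Prop := ∀ (order_ref : String), Dom_channel_of order_ref → Spec_channel_of order_ref (channel_of order_ref)

-- ===== LEMMAS AND PROOFS =====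

-- p ++ q is a prefix of l iff p is and q is a prefix of the rest
theorem prefix_append_iff' (p q l : List Char) :
    (p ++ q) <+: l ↔ p <+: l ∧ q <+: l.drop p.length := by
  constructor
  · rintro ⟨t, ht⟩
    rw [List.append_assoc] at ht
    refine ⟨⟨q ++ t, ht⟩, ⟨t, ?_⟩⟩
    rw [← ht, List.drop_left]
  · rintro ⟨h1, ⟨t, ht⟩⟩
    obtain ⟨u, hu⟩ := h1
    refine ⟨t, ?_⟩
    have hdu : List.drop p.length l = u := by rw [← hu, List.drop_left]
    rw [List.append_assoc, ht, hdu, hu]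

-- "s starts with 'shopify'++X (|X| = 3)" ↔ "s starts with 'shopify' and s[7:10] = X"
theorem startswith_seven_three (s : String) (X : String) (hX : X.toList.length = 3)
    (full : String) (hfull : full.toList = "shopify".toList ++ X.toList) :
    PySem.Str.startswith s full = true ↔
      (PySem.Str.startswith s "shopify" = true ∧ PySem.Str.slice s (some 7) (some 10) = X) := by
  have hsl : (PySem.Str.slice s (some 7) (some 10)).toList = (s.toList.drop 7).take 3 := by
    rw [PySem.Str.toList_slice, PySem.Chars.slice_eq_listSlice, PySem.List.slice_toNat] <;> simp
  have hstr : (PySem.Str.slice s (some 7) (some 10) = X) ↔ ((s.toList.drop 7).take 3 = X.toList) := by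
    constructor
    · intro h; rw [← hsl, h]
    · intro h
      have : (PySem.Str.slice s (some 7) (some 10)).toList = X.toList := by rw [hsl, h]
      exact String.toList_inj.mp this
  have h7 : ("shopify".toList).length = 7 := by decide
  rw [PySem.Str.startswith_eq, PySem.Str.startswith_eq, PySem.Chars.startswith_iff,
      PySem.Chars.startswith_iff, hfull, prefix_append_iff', hstr, h7]
  exact and_congr_right fun _ => by rw [List.prefix_iff_eq_take, hX, eq_comm]

theorem not_other_of_shopify (s : String) (p : String)
    (hp : ¬ p.toList <+: "shopify".toList) (hlen : p.toList.length ≤ 7)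
    (h : PySem.Str.startswith s "shopify" = true) :
    PySem.Str.startswith s p = false := by
  rw [PySem.Str.startswith_eq, PySem.Chars.startswith_iff] at h
  rw [PySem.Str.startswith_eq, ← Bool.not_eq_true, PySem.Chars.startswith_iff]
  intro hps
  exact hp (List.prefix_of_prefix_length_le hps h (by simpa using hlen))

-- two incomparable prefixes cannot both match
theorem startswith_excl (s p q : String)
    (h1 : ¬ p.toList <+: q.toList) (h2 : ¬ q.toList <+: p.toList)
    (hp : PySem.Str.startswith s p = true) : PySem.Str.startswith s q = false := by
  rw [PySem.Str.startswith_eq, PySem.Chars.startswith_iff] at hp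
  rw [PySem.Str.startswith_eq, ← Bool.not_eq_true, PySem.Chars.startswith_iff]
  intro hq
  rcases le_total p.toList.length q.toList.length with hle | hle
  · exact h1 (List.prefix_of_prefix_length_le hp hq hle)
  · exact h2 (List.prefix_of_prefix_length_le hq hp hle)

-- ===== VERDICT =====
theorem channel_of_spec : Claim_equal_channel_of := by
  intro s _
  unfold Spec_channel_of channel_of channel_of_alt channel_of_table
  have iY := startswith_seven_three s "YUK" (by decide) "shopifyYUK" (by decide)
  have iZ := startswith_seven_three s "ZUM" (by decide) "shopifyZUM" (by decide)
  have iR := startswith_seven_three s "RWW" (by decide) "shopifyRWW" (by decide)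
  have iU := startswith_seven_three s "USA" (by decide) "shopifyUSA" (by decide)
  have iB := startswith_seven_three s "B2B" (by decide) "shopifyB2B" (by decide)
  have iD := startswith_seven_three s "DYN" (by decide) "shopifyDYN" (by decide)
  by_cases h7 : PySem.Str.startswith s "shopify" = true
  · have ha := not_other_of_shopify s "amazon" (by decide) (by decide) h7
    have hw := not_other_of_shopify s "walmart" (by decide) (by decide) h7
    have he := not_other_of_shopify s "ebay" (by decide) (by decide) h7
    by_cases e1 : PySem.Str.slice s (some 7) (some 10) = "YUK" <;>
    by_cases e2 : PySem.Str.slice s (some 7) (some 10) = "ZUM" <;>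
    by_cases e3 : PySem.Str.slice s (some 7) (some 10) = "RWW" <;>
    by_cases e4 : PySem.Str.slice s (some 7) (some 10) = "USA" <;>
    by_cases e5 : PySem.Str.slice s (some 7) (some 10) = "B2B" <;>
    by_cases e6 : PySem.Str.slice s (some 7) (some 10) = "DYN" <;>
      (simp_all [channel_of_loop, List.foldl, PySem.Str.replace] <;> decide)
  · have hY : PySem.Str.startswith s "shopifyYUK" = false := by
      rw [← Bool.not_eq_true]; exact fun h => h7 (iY.mp h).1
    have hZ : PySem.Str.startswith s "shopifyZUM" = false := by
      rw [← Bool.not_eq_true]; exact fun h => h7 (iZ.mp h).1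
    have hR : PySem.Str.startswith s "shopifyRWW" = false := by
      rw [← Bool.not_eq_true]; exact fun h => h7 (iR.mp h).1
    have hU : PySem.Str.startswith s "shopifyUSA" = false := by
      rw [← Bool.not_eq_true]; exact fun h => h7 (iU.mp h).1
    have hB : PySem.Str.startswith s "shopifyB2B" = false := by
      rw [← Bool.not_eq_true]; exact fun h => h7 (iB.mp h).1
    have hD : PySem.Str.startswith s "shopifyDYN" = false := by
      rw [← Bool.not_eq_true]; exact fun h => h7 (iD.mp h).1
    by_cases ha : PySem.Str.startswith s "amazon" = true
    · have hw := startswith_excl s "amazon" "walmart" (by decide) (by decide) ha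
      have he := startswith_excl s "amazon" "ebay" (by decide) (by decide) ha
      simp_all [channel_of_loop, List.foldl]
    · by_cases hw : PySem.Str.startswith s "walmart" = true
      · have he := startswith_excl s "walmart" "ebay" (by decide) (by decide) hw
        simp_all [channel_of_loop, List.foldl]
      · by_cases he : PySem.Str.startswith s "ebay" = true <;>
          simp_all [channel_of_loop, List.foldl]
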